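-- pv_equiv track=rewrite | github.com/bostanberkay/TREN | cs_pipeline.py | _decide_matrix_embed
-- ===== SOURCE A (Python) =====
-- def _decide_matrix_embed(labels, cfg):
--     """
--     Basit ve deterministik kural:
--       - Matrix: TR/EN oyla (MIXED'i ağırlıklandır)
--       - Embed:
--           Matrix TR ise: cümlede EN veya MIXED varsa EN, yoksa "-"
--           Matrix EN ise: cümlede TR veya MIXED varsa TR, yoksa "-"
--     """
--     # Matrix
--     score_tr = sum(1 for lb in labels if lb == "TR")
--     score_en = sum(1 for lb in labels if lb == "EN")
--     mixed_cnt = sum(1 for lb in labels if lb == "MIXED")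
--     score_tr += cfg["MIXED_TR_WEIGHT"] * mixed_cnt
--     score_en += cfg["MIXED_EN_WEIGHT"] * mixed_cnt
--
--     # Eşitlikte TR'yi tercih ediyoruz (önceki davranışla uyumlu)
--     matrix = "TR" if score_tr >= score_en else "EN"
--
--     # Embed kararı
--     if matrix == "TR":
--         # EN veya MIXED var mı?
--         embed = "EN" if any(lb in ("EN", "MIXED") for lb in labels) else "-"
--     else:
--         # TR veya MIXED var mı?
--         embed = "TR" if any(lb in ("TR", "MIXED") for lb in labels) else "-"
--
--     return matrix, embed
-- ===== SOURCE B (Python) =====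
-- def _decide_matrix_embed(labels, cfg):
--     # Differential vote: a single signed balance (TR=+1, EN=-1, MIXED=weight
--     # difference) plus two presence flags; matrix is decided by the sign of
--     # the balance, embed by the flags. No counts and no weighted comparison.
--     w = cfg["MIXED_TR_WEIGHT"] - cfg["MIXED_EN_WEIGHT"]
--     bal = 0
--     en_ish = tr_ish = False
--     for lb in labels:
--         if lb == "TR":
--             bal += 1
--             tr_ish = True
--         elif lb == "EN":
--             bal -= 1
--             en_ish = True
--         elif lb == "MIXED":
--             bal += w
--             en_ish = tr_ish = True
--     if bal >= 0:
--         return "TR", ("EN" if en_ish else "-")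
--     return "EN", ("TR" if tr_ish else "-")
-- ===== Notes on version B (the rewrite author's own statement) =====
-- stated objective: alternative
-- what changed: B replaces A's per-label counts and two-sided weighted score comparison by a single signed balance accumulator (TR=+1, EN=-1, MIXED=weight difference) plus two presence flags, deciding matrix by the sign of the balance; A's any(...) re-scans disappear.
import Mathlib
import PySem

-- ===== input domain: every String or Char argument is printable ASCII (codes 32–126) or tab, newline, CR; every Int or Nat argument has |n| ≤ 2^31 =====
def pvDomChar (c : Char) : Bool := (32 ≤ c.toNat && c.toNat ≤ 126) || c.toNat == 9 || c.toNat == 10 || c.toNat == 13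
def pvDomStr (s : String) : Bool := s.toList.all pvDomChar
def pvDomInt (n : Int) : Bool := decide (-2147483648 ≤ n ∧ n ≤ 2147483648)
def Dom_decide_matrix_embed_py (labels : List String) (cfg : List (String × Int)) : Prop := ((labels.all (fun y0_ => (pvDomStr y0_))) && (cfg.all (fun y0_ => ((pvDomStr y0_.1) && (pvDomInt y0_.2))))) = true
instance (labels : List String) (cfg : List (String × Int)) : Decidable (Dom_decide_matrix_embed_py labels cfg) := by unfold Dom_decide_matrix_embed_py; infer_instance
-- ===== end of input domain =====

-- B replaces A's per-label counts and two-sided weighted comparison by one signed balance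
-- accumulator plus two presence flags; matrix is a sign test (objective: alternative).

-- ===== PORT A =====
def decide_matrix_embed_py (labels : List String) (cfg : List (String × Int)) : String × String :=
  let score_tr : Int := labels.foldl (fun a lb => if lb == "TR" then a + 1 else a) 0
  let score_en : Int := labels.foldl (fun a lb => if lb == "EN" then a + 1 else a) 0
  let mixed_cnt : Int := labels.foldl (fun a lb => if lb == "MIXED" then a + 1 else a) 0
  -- cfg["…"]: first-match lookup; Pre_ guarantees the key is present (KeyError otherwise)
  let score_tr := score_tr + ((PySem.Dict.mk cfg).get? "MIXED_TR_WEIGHT").getD 0 * mixed_cnt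
  let score_en := score_en + ((PySem.Dict.mk cfg).get? "MIXED_EN_WEIGHT").getD 0 * mixed_cnt
  let matrix := if score_tr ≥ score_en then "TR" else "EN"
  let embed :=
    if matrix == "TR" then
      if labels.any (fun lb => lb == "EN" || lb == "MIXED") then "EN" else "-"
    else
      if labels.any (fun lb => lb == "TR" || lb == "MIXED") then "TR" else "-"
  (matrix, embed)

-- ===== PORT B =====
def decide_matrix_embed_py_alt (labels : List String) (cfg : List (String × Int)) : String × String :=
  let w : Int := ((PySem.Dict.mk cfg).get? "MIXED_TR_WEIGHT").getD 0
               - ((PySem.Dict.mk cfg).get? "MIXED_EN_WEIGHT").getD 0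
  let s : Int × Bool × Bool := labels.foldl (fun s lb =>
      if lb == "TR" then (s.1 + 1, s.2.1, true)
      else if lb == "EN" then (s.1 - 1, true, s.2.2)
      else if lb == "MIXED" then (s.1 + w, true, true)
      else s) (0, false, false)
  if s.1 ≥ 0 then ("TR", if s.2.1 then "EN" else "-")
  else ("EN", if s.2.2 then "TR" else "-")

-- ===== PRECONDITION & SPEC =====
-- Pre_ excludes exactly the inputs where A raises KeyError: cfg missing one of the two weight keys.
def Pre_decide_matrix_embed_py (labels : List String) (cfg : List (String × Int)) : Prop :=
  "MIXED_TR_WEIGHT" ∈ cfg.map Prod.fst ∧ "MIXED_EN_WEIGHT" ∈ cfg.map Prod.fst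
instance (labels : List String) (cfg : List (String × Int)) : Decidable (Pre_decide_matrix_embed_py labels cfg) := by unfold Pre_decide_matrix_embed_py; infer_instance
def pvWitness_decide_matrix_embed_py : List String × (List (String × Int)) :=
  (["TR", "EN", "MIXED"], [("MIXED_TR_WEIGHT", 1), ("MIXED_EN_WEIGHT", 0)])
def Spec_decide_matrix_embed_py (labels : List String) (cfg : List (String × Int)) (out : String × String) : Prop := out = decide_matrix_embed_py_alt labels cfg
instance (labels : List String) (cfg : List (String × Int)) (out : String × String) : Decidable (Spec_decide_matrix_embed_py labels cfg out) := by unfold Spec_decide_matrix_embed_py; infer_instance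

-- ===== CLAIM (what is proved, stated in full; the proofs are below) =====
def Claim_equal_decide_matrix_embed_py : Prop := ∀ (labels : List String) (cfg : List (String × Int)), Dom_decide_matrix_embed_py labels cfg → Pre_decide_matrix_embed_py labels cfg → Spec_decide_matrix_embed_py labels cfg (decide_matrix_embed_py labels cfg)

-- ===== LEMMAS AND PROOFS =====

-- A's counting fold with any starting value equals the start plus countP.
theorem pv_foldl_count (p : String → Bool) :
    ∀ (labels : List String) (a : Int),
      labels.foldl (fun acc lb => if p lb then acc + 1 else acc) a = a + (labels.countP p : Int) := by
  intro labels
  induction labels with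
  | nil => intro a; simp
  | cons x xs ih =>
    intro a
    rw [List.foldl_cons]
    by_cases h : p x = true
    · rw [if_pos h, ih]
      simp [List.countP_cons, h]
      omega
    · rw [if_neg h, ih]
      simp [List.countP_cons, h]

-- B's balance-and-flags fold in terms of counts and any.
theorem pv_fold_bal (w : Int) :
    ∀ (labels : List String) (a : Int) (e t : Bool),
      labels.foldl (fun s lb =>
        if lb == "TR" then (s.1 + 1, s.2.1, true)
        else if lb == "EN" then (s.1 - 1, true, s.2.2)
        else if lb == "MIXED" then (s.1 + w, true, true)
        else s) (a, e, t)
      = (a + (labels.countP (· == "TR") : Int) - (labels.countP (· == "EN") : Int)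
           + w * (labels.countP (· == "MIXED") : Int),
         e || labels.any (fun lb => lb == "EN" || lb == "MIXED"),
         t || labels.any (fun lb => lb == "TR" || lb == "MIXED")) := by
  intro labels
  induction labels with
  | nil => intro a e t; simp
  | cons x xs ih =>
    intro a e t
    rw [List.foldl_cons]
    by_cases h1 : (x == "TR") = true
    · have hx : x = "TR" := by simpa using h1
      rw [if_pos h1, ih]
      simp [List.countP_cons, List.any_cons, hx, Prod.ext_iff]
      omega
    · by_cases h2 : (x == "EN") = true
      · have hx : x = "EN" := by simpa using h2
        rw [if_neg h1, if_pos h2, ih]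
        simp [List.countP_cons, List.any_cons, hx, Prod.ext_iff]
        omega
      · by_cases h3 : (x == "MIXED") = true
        · have hx : x = "MIXED" := by simpa using h3
          rw [if_neg h1, if_neg h2, if_pos h3, ih]
          simp [List.countP_cons, List.any_cons, hx, Prod.ext_iff]
          ring
        · rw [if_neg h1, if_neg h2, if_neg h3, ih]
          simp [List.countP_cons, List.any_cons, h1, h2, h3]

-- ===== VERDICT (by name: the statement is the Claim_ definition above) =====
theorem decide_matrix_embed_py_spec : Claim_equal_decide_matrix_embed_py := by
  intro labels cfg _hDom _hPre
  unfold Spec_decide_matrix_embed_py decide_matrix_embed_py decide_matrix_embed_py_alt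
  dsimp only
  rw [pv_fold_bal, pv_foldl_count (· == "TR"), pv_foldl_count (· == "EN"),
      pv_foldl_count (· == "MIXED")]
  simp only [zero_add, Bool.false_or]
  set wtr := ((PySem.Dict.mk cfg).get? "MIXED_TR_WEIGHT").getD 0 with hwtr
  set wen := ((PySem.Dict.mk cfg).get? "MIXED_EN_WEIGHT").getD 0 with hwen
  have hiff :
      ((labels.countP (· == "TR") : Int) + wtr * (labels.countP (· == "MIXED") : Int)
        ≥ (labels.countP (· == "EN") : Int) + wen * (labels.countP (· == "MIXED") : Int))
      ↔ ((labels.countP (· == "TR") : Int) - (labels.countP (· == "EN") : Int)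
        + (wtr - wen) * (labels.countP (· == "MIXED") : Int) ≥ 0) := by
    constructor <;> intro h <;> nlinarith [h]
  by_cases hs : ((labels.countP (· == "TR") : Int) + wtr * (labels.countP (· == "MIXED") : Int)
      ≥ (labels.countP (· == "EN") : Int) + wen * (labels.countP (· == "MIXED") : Int))
  · rw [if_pos hs, if_pos (hiff.mp hs), if_pos (by decide : (("TR" : String) == "TR") = true)]
  · rw [if_neg hs, if_neg (fun h => hs (hiff.mpr h)),
        if_neg (by decide : ¬ (("EN" : String) == "TR") = true)]
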